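-- pv_equiv track=rewrite | github.com/tmu-nlp/UniTP | utils/str_ops.py | cat_lines
-- ===== SOURCE A (Python) =====
-- SPACE = ' '
--
-- def cat_lines(lhs_lines, rhs_lines, offset = 0, from_top = False):
--     lhs_len = len(lhs_lines)
--     rhs_len = len(rhs_lines)
--     lines = []
--     lhs_span = max(len(x) for x in lhs_lines)
--     rhs_span = max(len(x) for x in rhs_lines)
--     lhs_space = SPACE * lhs_span
--     rhs_space = SPACE * rhs_span
--     assert offset >= 0
--     if not from_top:
--         lhs_lines = lhs_lines[::-1]
--         rhs_lines = rhs_lines[::-1]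
--     for lid, lhs_line in enumerate(lhs_lines):
--         line = lhs_line + SPACE * (lhs_span - len(lhs_line))
--         if 0 <= lid - offset < rhs_len:
--             line += rhs_lines[lid - offset]
--         # else:
--         #     line += rhs_space
--         lines.append(line)
--     rhs_remain = lhs_len - offset
--     while rhs_remain < rhs_len:
--         if rhs_remain < 0:
--             line = ''
--         else:
--             line = lhs_space + rhs_lines[rhs_remain]
--         lines.append(line)
--         rhs_remain += 1
--     if not from_top:
--         lines.reverse()
--     return lines
-- ===== SOURCE B (Python) =====
-- SPACE = ' '
--
-- def cat_lines(lhs_lines, rhs_lines, offset = 0, from_top = False):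
--     # Single pass over the output rows in their final order: no input reversal,
--     # no separate tail loop, no final reverse.
--     assert offset >= 0
--     lhs_len = len(lhs_lines)
--     rhs_len = len(rhs_lines)
--     lhs_span = max(len(x) for x in lhs_lines)
--     total = max(lhs_len, rhs_len + offset)
--     out = []
--     for i in range(total):
--         r = i if from_top else total - 1 - i
--         k = r - offset
--         if r < lhs_len:
--             line = (lhs_lines[r] if from_top else lhs_lines[lhs_len - 1 - r]).ljust(lhs_span)
--             if 0 <= k < rhs_len:
--                 line += rhs_lines[k] if from_top else rhs_lines[rhs_len - 1 - k]
--         elif k < 0: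
--             line = ''
--         else:
--             line = SPACE * lhs_span + (rhs_lines[k] if from_top else rhs_lines[rhs_len - 1 - k])
--         out.append(line)
--     return out
-- ===== Notes on version B (the rewrite author's own statement) =====
-- stated objective: alternative
-- what changed: Instead of reversing the inputs, running a main loop plus a separate tail while-loop and reversing the output, B computes the total row count and builds each output row directly in final order with one indexed loop (mirror indexing replaces all three reversals).
import Mathlib
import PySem

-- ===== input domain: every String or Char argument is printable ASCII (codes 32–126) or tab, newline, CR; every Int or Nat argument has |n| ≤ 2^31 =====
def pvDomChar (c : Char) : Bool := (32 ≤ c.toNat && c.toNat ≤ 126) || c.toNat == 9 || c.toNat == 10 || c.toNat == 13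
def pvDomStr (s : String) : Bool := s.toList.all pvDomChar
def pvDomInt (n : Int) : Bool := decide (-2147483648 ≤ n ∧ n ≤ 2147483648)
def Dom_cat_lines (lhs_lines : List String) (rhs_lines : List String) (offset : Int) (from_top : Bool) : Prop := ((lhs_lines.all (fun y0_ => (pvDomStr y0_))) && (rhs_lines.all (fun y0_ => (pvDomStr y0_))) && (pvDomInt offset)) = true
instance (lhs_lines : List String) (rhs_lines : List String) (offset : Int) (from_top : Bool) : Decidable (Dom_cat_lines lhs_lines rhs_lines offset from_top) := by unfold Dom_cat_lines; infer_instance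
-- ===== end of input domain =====

-- B rebuilds the result in one pass over the final row order (no input reversal, no
-- separate tail loop, no final reverse); objective: simpler/alternative decomposition.

-- ===== PORT A =====
-- the `while rhs_remain < rhs_len` loop of A, producing the rows it appends
def catA_tail (R : List String) (lhs_space : String) (rhs_len : Int) (rhs_remain : Int) : List String :=
  if _h : rhs_remain < rhs_len then
    (if rhs_remain < 0 then "" else lhs_space ++ (PySem.List.pyGet? R rhs_remain).getD "")
      :: catA_tail R lhs_space rhs_len (rhs_remain + 1)
  else []
termination_by (rhs_len - rhs_remain).toNat
decreasing_by omega

def cat_lines (lhs_lines : List String) (rhs_lines : List String) (offset : Int) (from_top : Bool) : List String :=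
  let lhs_len : Int := PySem.List.len lhs_lines
  let rhs_len : Int := PySem.List.len rhs_lines
  -- max(len(x) for x in lhs_lines): raises on []; Pre_ excludes the empty list
  let lhs_span : Int := (PySem.List.max? (lhs_lines.map PySem.Str.len) id).getD 0
  let _rhs_span : Int := (PySem.List.max? (rhs_lines.map PySem.Str.len) id).getD 0
  let lhs_space : String := String.ofList (PySem.List.pyRepeat [' '] lhs_span)   -- SPACE * lhs_span
  -- assert offset >= 0: Pre_ excludes offset < 0
  let L := if !from_top then (PySem.List.slice? lhs_lines none none (-1)).getD [] else lhs_lines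
  let R := if !from_top then (PySem.List.slice? rhs_lines none none (-1)).getD [] else rhs_lines
  let lines : List String := (PySem.List.enumerate L).foldl (fun lines p =>
      let line := p.2 ++ String.ofList (PySem.List.pyRepeat [' '] (lhs_span - PySem.Str.len p.2))
      let line := if 0 ≤ p.1 - offset ∧ p.1 - offset < rhs_len
                  then line ++ (PySem.List.pyGet? R (p.1 - offset)).getD "" else line
      lines ++ [line]) []
  let lines := lines ++ catA_tail R lhs_space rhs_len (lhs_len - offset)
  if !from_top then lines.reverse else lines

-- ===== PORT B =====
def cat_lines_alt (lhs_lines : List String) (rhs_lines : List String) (offset : Int) (from_top : Bool) : List String :=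
  let lhs_len : Int := PySem.List.len lhs_lines
  let rhs_len : Int := PySem.List.len rhs_lines
  let lhs_span : Int := (PySem.List.max? (lhs_lines.map PySem.Str.len) id).getD 0
  let total : Int := max lhs_len (rhs_len + offset)
  (List.range total.toNat).map (fun (i0 : Nat) =>
    let r : Int := if from_top then (i0 : Int) else total - 1 - (i0 : Int)
    let k : Int := r - offset
    if r < lhs_len then
      let left := (if from_top then PySem.List.pyGet? lhs_lines r
                   else PySem.List.pyGet? lhs_lines (lhs_len - 1 - r)).getD ""
      -- left.ljust(lhs_span): pads with spaces only when lhs_span > len(left) — exact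
      let line := left ++ String.ofList (PySem.List.pyRepeat [' '] (lhs_span - PySem.Str.len left))
      if 0 ≤ k ∧ k < rhs_len then
        line ++ ((if from_top then PySem.List.pyGet? rhs_lines k
                  else PySem.List.pyGet? rhs_lines (rhs_len - 1 - k)).getD "")
      else line
    else if k < 0 then ""
    else String.ofList (PySem.List.pyRepeat [' '] lhs_span) ++
         ((if from_top then PySem.List.pyGet? rhs_lines k
           else PySem.List.pyGet? rhs_lines (rhs_len - 1 - k)).getD ""))

-- ===== PRECONDITION & SPEC =====
-- Pre_ excludes exactly the inputs where A raises: max() on an empty lhs_lines or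
-- rhs_lines (ValueError) and a negative offset (AssertionError).
def Pre_cat_lines (lhs_lines : List String) (rhs_lines : List String) (offset : Int) (from_top : Bool) : Prop :=
  lhs_lines ≠ [] ∧ rhs_lines ≠ [] ∧ 0 ≤ offset
instance (lhs_lines : List String) (rhs_lines : List String) (offset : Int) (from_top : Bool) : Decidable (Pre_cat_lines lhs_lines rhs_lines offset from_top) := by unfold Pre_cat_lines; infer_instance

def pvWitness_cat_lines : List String × List String × Int × Bool := (["ab", "c"], ["xy"], 1, false)

def Spec_cat_lines (lhs_lines : List String) (rhs_lines : List String) (offset : Int) (from_top : Bool) (out : List String) : Prop := out = cat_lines_alt lhs_lines rhs_lines offset from_top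
instance (lhs_lines : List String) (rhs_lines : List String) (offset : Int) (from_top : Bool) (out : List String) : Decidable (Spec_cat_lines lhs_lines rhs_lines offset from_top out) := by unfold Spec_cat_lines; infer_instance

-- ===== CLAIM (what is proved, stated in full; the proofs are below) =====
def Claim_equal_cat_lines : Prop := ∀ (lhs_lines : List String) (rhs_lines : List String) (offset : Int) (from_top : Bool), Dom_cat_lines lhs_lines rhs_lines offset from_top → Pre_cat_lines lhs_lines rhs_lines offset from_top → Spec_cat_lines lhs_lines rhs_lines offset from_top (cat_lines lhs_lines rhs_lines offset from_top)

-- ===== LEMMAS AND PROOFS =====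

-- row `j` of the result in working orientation (lists already oriented), used only in proofs
def rowF (L R : List String) (off span : Int) (j : Nat) : String :=
  if (j : Int) < (L.length : Int) then
    let s := PySem.List.pyGetD L (j : Int) ""
    let line := s ++ String.ofList (PySem.List.pyRepeat [' '] (span - PySem.Str.len s))
    if 0 ≤ (j : Int) - off ∧ (j : Int) - off < (R.length : Int) then
      line ++ (PySem.List.pyGet? R ((j : Int) - off)).getD ""
    else line
  else if (j : Int) - off < 0 then ""
  else String.ofList (PySem.List.pyRepeat [' '] span) ++ (PySem.List.pyGet? R ((j : Int) - off)).getD ""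

theorem catA_tail_eq (R : List String) (s : String) (rl t : Int) :
    catA_tail R s rl t =
      (List.range (rl - t).toNat).map
        (fun (j : Nat) => if t + (j : Int) < 0 then "" else s ++ (PySem.List.pyGet? R (t + (j : Int))).getD "") := by
  generalize hk : (rl - t).toNat = k
  induction k generalizing t with
  | zero =>
    rw [catA_tail, dif_neg (by omega)]
    rfl
  | succ k ih =>
    rw [catA_tail, dif_pos (by omega), List.range_succ_eq_map]
    simp only [List.map_cons, List.map_map, Nat.cast_zero, add_zero]
    refine congrArg₂ _ rfl ?_
    rw [ih (t + 1) (by omega)]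
    apply List.map_congr_left
    intro j _
    have : t + 1 + (j : Int) = t + ((j : Int) + 1) := by ring
    simp [Function.comp, this]

theorem A_eq_rows (L R : List String) (off span : Int) (n m : Nat)
    (hn : L.length = n) (hm : R.length = m) (hoff : 0 ≤ off) :
    ((PySem.List.enumerate L).foldl (fun lines p =>
        lines ++ [if 0 ≤ p.1 - off ∧ p.1 - off < (m : Int)
          then p.2 ++ String.ofList (PySem.List.pyRepeat [' '] (span - PySem.Str.len p.2))
               ++ (PySem.List.pyGet? R (p.1 - off)).getD ""
          else p.2 ++ String.ofList (PySem.List.pyRepeat [' '] (span - PySem.Str.len p.2))]) [])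
      ++ catA_tail R (String.ofList (PySem.List.pyRepeat [' '] span)) (m : Int) ((n : Int) - off)
    = (List.range (max (n : Int) ((m : Int) + off)).toNat).map (rowF L R off span) := by
  subst hn hm
  rw [PySem.List.enumerate_eq_map_pyRange L "", List.foldl_map,
      PySem.List.foldl_append_singleton_eq_map, PySem.List.pyRange_one, List.map_map,
      catA_tail_eq, PySem.List.len_eq]
  have hN : (max (L.length : Int) ((R.length : Int) + off)).toNat
      = L.length + ((R.length : Int) - ((L.length : Int) - off)).toNat := by omega
  rw [hN, List.range_add, List.map_append, List.nil_append]
  have h0 : ((L.length : Int) - 0).toNat = L.length := by omega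
  refine congrArg₂ _ ?_ ?_
  · rw [h0]
    apply List.map_congr_left
    intro j hj
    have hj' : j < L.length := List.mem_range.mp hj
    simp only [Function.comp_apply, zero_add, rowF,
      if_pos (by exact_mod_cast Nat.cast_lt.mpr hj' : (j : Int) < (L.length : Int))]
  · rw [List.map_map]
    apply List.map_congr_left
    intro j hj
    have hj' : j < ((R.length : Int) - ((L.length : Int) - off)).toNat := List.mem_range.mp hj
    have hkey : (L.length : Int) - off + (j : Int) = ((L.length + j : Nat) : Int) - off := by
      push_cast; ring
    simp only [Function.comp_apply, rowF, hkey]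
    rw [if_neg (show ¬(((L.length + j : Nat) : Int) < (L.length : Int)) by push_cast; omega)]

-- on reversed lists an in-range access reads the mirror index of the original list
theorem pyRevGet_eq {α : Type} (xs : List α) (r : Int) (h0 : 0 ≤ r) (h1 : r < (xs.length : Int)) :
    PySem.List.pyGet? xs.reverse r = PySem.List.pyGet? xs ((xs.length : Int) - 1 - r) := by
  rw [PySem.List.pyGet?_of_nonneg_of_lt _ h0 (by simpa using h1),
      PySem.List.pyGet?_of_nonneg_of_lt _ (by omega) (by omega)]
  rw [List.getElem?_reverse (by omega)]
  congr 1
  omega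


-- pointwise: row (N-1-i) of the working (reversed) orientation is B's row i for from_top = False
theorem row_rev_eq (lhs rhs : List String) (off span : Int) (i : Nat)
    (hi : i < (max ((lhs.length : Int)) ((rhs.length : Int) + off)).toNat) :
    rowF lhs.reverse rhs.reverse off span ((max ((lhs.length : Int)) ((rhs.length : Int) + off)).toNat - 1 - i)
    =
    (if max ((lhs.length : Int)) ((rhs.length : Int) + off) - 1 - (i : Int) < (lhs.length : Int) then
      if 0 ≤ max ((lhs.length : Int)) ((rhs.length : Int) + off) - 1 - (i : Int) - off ∧
          max ((lhs.length : Int)) ((rhs.length : Int) + off) - 1 - (i : Int) - off < (rhs.length : Int) then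
        (PySem.List.pyGet? lhs ((lhs.length : Int) - 1 - (max ((lhs.length : Int)) ((rhs.length : Int) + off) - 1 - (i : Int)))).getD "" ++
          String.ofList (PySem.List.pyRepeat [' '] (span -
            PySem.Str.len ((PySem.List.pyGet? lhs ((lhs.length : Int) - 1 - (max ((lhs.length : Int)) ((rhs.length : Int) + off) - 1 - (i : Int)))).getD ""))) ++
          (PySem.List.pyGet? rhs ((rhs.length : Int) - 1 - (max ((lhs.length : Int)) ((rhs.length : Int) + off) - 1 - (i : Int) - off))).getD ""
      else
        (PySem.List.pyGet? lhs ((lhs.length : Int) - 1 - (max ((lhs.length : Int)) ((rhs.length : Int) + off) - 1 - (i : Int)))).getD "" ++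
          String.ofList (PySem.List.pyRepeat [' '] (span -
            PySem.Str.len ((PySem.List.pyGet? lhs ((lhs.length : Int) - 1 - (max ((lhs.length : Int)) ((rhs.length : Int) + off) - 1 - (i : Int)))).getD "")))
    else
      if max ((lhs.length : Int)) ((rhs.length : Int) + off) - 1 - (i : Int) - off < 0 then ""
      else
        String.ofList (PySem.List.pyRepeat [' '] span) ++
          (PySem.List.pyGet? rhs ((rhs.length : Int) - 1 - (max ((lhs.length : Int)) ((rhs.length : Int) + off) - 1 - (i : Int) - off))).getD "") := by
  have hT1 : (lhs.length : Int) ≤ max ((lhs.length : Int)) ((rhs.length : Int) + off) := le_max_left _ _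
  have hT2 : (rhs.length : Int) + off ≤ max ((lhs.length : Int)) ((rhs.length : Int) + off) := le_max_right _ _
  have hT3 : max ((lhs.length : Int)) ((rhs.length : Int) + off) = (lhs.length : Int) ∨
      max ((lhs.length : Int)) ((rhs.length : Int) + off) = (rhs.length : Int) + off := max_choice _ _
  have hTnn : (0 : Int) ≤ max ((lhs.length : Int)) ((rhs.length : Int) + off) :=
    le_trans (Int.natCast_nonneg _) hT1
  have hT := Int.toNat_of_nonneg hTnn
  have hj : (((max ((lhs.length : Int)) ((rhs.length : Int) + off)).toNat - 1 - i : Nat) : Int)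
      = max ((lhs.length : Int)) ((rhs.length : Int) + off) - 1 - (i : Int) := by omega
  have h0r : (0 : Int) ≤ max ((lhs.length : Int)) ((rhs.length : Int) + off) - 1 - (i : Int) := by omega
  simp only [rowF, hj, List.length_reverse]
  split_ifs with hcl hcr hk
  · rw [PySem.List.pyGetD, pyRevGet_eq lhs _ h0r hcl,
        pyRevGet_eq rhs _ hcr.1 hcr.2]
  · rw [PySem.List.pyGetD, pyRevGet_eq lhs _ h0r hcl]
  · rfl
  · rw [pyRevGet_eq rhs _ (by omega) (by omega)]

-- ===== VERDICT (by name: the statement is the Claim_ definition above) =====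
theorem cat_lines_spec : Claim_equal_cat_lines := by
  intro lhs rhs off ft _dom hpre
  obtain ⟨hl, hr, hoff⟩ := hpre
  unfold Spec_cat_lines cat_lines cat_lines_alt
  simp only [PySem.List.len_eq, PySem.List.slice?_none_none_neg_one, Option.getD_some]
  cases ft with
  | true =>
    simp only [Bool.not_true, Bool.false_eq_true, if_false, if_true]
    rw [A_eq_rows lhs rhs off _ lhs.length rhs.length rfl rfl hoff]
    apply List.map_congr_left
    intro i _
    simp only [rowF, PySem.List.pyGetD]
  | false =>
    simp only [Bool.not_false, Bool.false_eq_true, if_true, if_false]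
    rw [A_eq_rows lhs.reverse rhs.reverse off _ lhs.length rhs.length (by simp) (by simp) hoff]
    apply List.ext_getElem (by simp)
    intro i h1 h2
    simp only [List.getElem_reverse, List.getElem_map, List.getElem_range,
      List.length_map, List.length_range]
    exact row_rev_eq lhs rhs off _ i (by simpa using h1)
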